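-- pv_equiv track=rewrite | github.com/SahilManaktala/ElectionSystem | smart_card/views.py | next_string
-- ===== SOURCE A (Python) =====
-- import string
--
-- def next_string(current):
--     l = [str(i) for i in range(0, 10)]
--     l = l + list(string.ascii_uppercase)
--     s = list(current)
--     i = len(current) - 1
--     ch = l[(l.index(s[i]) + 1) % 36]
--     while i != -1:
--         s[i] = ch
--         if ch != '0':
--             break
--         i = i - 1
--         ch = l[(l.index(s[i]) + 1) % 36]
--     return ''.join(s)
-- ===== SOURCE B (Python) =====
-- import string
--
-- ALPHABET = string.digits + string.ascii_uppercase
--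
-- def next_string(current):
--     # closed form: replace the trailing run of 'Z' by '0's and bump the digit before it
--     stripped = current.rstrip('Z')
--     t = len(current) - len(stripped)
--     if t == len(current):
--         return '0' * t
--     c = ALPHABET[ALPHABET.index(stripped[-1]) + 1]
--     return stripped[:-1] + c + '0' * t
-- ===== Notes on version B (the rewrite author's own statement) =====
-- stated objective: simpler
-- what changed: A walks the string right-to-left mutating a char list with a carry loop; B computes the answer in closed form: strip the trailing run of 'Z', bump the digit before it via the alphabet, and pad with '0's (all-'Z' strings wrap to all '0's).
import Mathlib
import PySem

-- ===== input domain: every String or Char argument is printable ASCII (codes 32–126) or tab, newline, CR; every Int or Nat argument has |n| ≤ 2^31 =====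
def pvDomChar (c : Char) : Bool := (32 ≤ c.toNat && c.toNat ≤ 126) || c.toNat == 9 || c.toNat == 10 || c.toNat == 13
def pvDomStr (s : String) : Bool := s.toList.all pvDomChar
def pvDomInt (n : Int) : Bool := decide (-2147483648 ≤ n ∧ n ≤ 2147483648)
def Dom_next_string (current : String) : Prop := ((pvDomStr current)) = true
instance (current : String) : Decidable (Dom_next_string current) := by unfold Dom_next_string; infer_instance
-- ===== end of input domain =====

-- B replaces A's right-to-left carry loop by a closed form (strip the trailing 'Z'-run, bump
-- one digit, pad with '0's); equivalence is about the return value only (A mutates no argument).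

-- ===== PORT A =====
-- l = [str(i) for i in range(0,10)] + list(string.ascii_uppercase)  (constant list of 1-char strings → chars)
def pvAlpha : List Char :=
  ['0','1','2','3','4','5','6','7','8','9','A','B','C','D','E','F','G','H','I','J',
   'K','L','M','N','O','P','Q','R','S','T','U','V','W','X','Y','Z']

-- ch = l[(l.index(s[i]) + 1) % 36]  (none = IndexError / ValueError, excluded by Pre_)
def nsCh (l s : List Char) (i : Int) : Option Char :=
  match PySem.List.pyGet? s i with
  | none => none
  | some c =>
    match PySem.List.index? l c with
    | none => none
    | some k => PySem.List.pyGet? l (PySem.Int.mod ((k : Int) + 1) 36)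

-- the while-loop; fuel = len(s)+1 bounds the iterations (i decreases to -1)
def nsLoop (l s : List Char) (i : Int) (ch : Char) : Nat → List Char
  | 0 => s
  | fuel + 1 =>
    if i = -1 then s
    else
      let s' := PySem.List.pySetD s i ch
      if ch ≠ '0' then s'
      else
        match nsCh l s' (i - 1) with
        | none => s'          -- Python raises here; unreachable under Pre_
        | some ch' => nsLoop l s' (i - 1) ch' fuel

def next_string (current : String) : String :=
  let s := current.toList
  let i : Int := (s.length : Int) - 1
  match nsCh pvAlpha s i with
  | none => ""                -- Python raises (IndexError / ValueError); excluded by Pre_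
  | some ch => String.ofList (nsLoop pvAlpha s i ch (s.length + 1))

-- ===== PORT B =====
-- ALPHABET = string.digits + string.ascii_uppercase (the same constant; shared with port A)
def next_string_alt (current : String) : String :=
  let cs := current.toList
  -- current.rstrip('Z'), exact: drop the trailing run of 'Z'
  let stripped := (cs.reverse.dropWhile (fun c => c == 'Z')).reverse
  let t := cs.length - stripped.length
  if t = cs.length then String.ofList (List.replicate t '0')
  else
    match PySem.List.pyGet? stripped (-1) with
    | none => ""              -- unreachable: t ≠ len(cs) means stripped ≠ []
    | some cl =>
      match PySem.List.index? pvAlpha cl with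
      | none => ""            -- ValueError; excluded by Pre_
      | some k =>
        match PySem.List.pyGet? pvAlpha ((k : Int) + 1) with
        | none => ""          -- IndexError; unreachable under Pre_ (cl ≠ 'Z')
        | some c =>
          String.ofList (PySem.List.slice stripped none (some (-1)) ++ c :: List.replicate t '0')

-- ===== PRECONDITION & SPEC =====
-- Pre_ excludes exactly the inputs where A raises: the empty string (IndexError from s[-1]) and
-- strings whose first non-'Z' character from the right is outside 0-9A-Z (ValueError from l.index).
def Pre_next_string (current : String) : Prop :=
  current.toList ≠ [] ∧
  (let c := ((current.toList.reverse.dropWhile (fun c => c == 'Z')).head?).getD '0'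
   ('0' ≤ c ∧ c ≤ '9') ∨ ('A' ≤ c ∧ c ≤ 'Z'))
instance (current : String) : Decidable (Pre_next_string current) := by
  unfold Pre_next_string; infer_instance

def pvWitness_next_string : String := "A9Z"

def Spec_next_string (current : String) (out : String) : Prop := out = next_string_alt current
instance (current : String) (out : String) : Decidable (Spec_next_string current out) := by
  unfold Spec_next_string; infer_instance

-- ===== CLAIM (what is proved, stated in full; the proofs are below) =====
def Claim_equal_next_string : Prop := ∀ (current : String), Dom_next_string current → Pre_next_string current → Spec_next_string current (next_string current)

-- ===== LEMMAS AND PROOFS =====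

theorem nsLoop_neg_one (l s : List Char) (ch : Char) (fuel : Nat) :
    nsLoop l s (-1) ch fuel = s := by
  cases fuel <;> simp [nsLoop]

-- the ch computed for position pre.length+t of "pre, digit c (index k), t trailing 'Z's, done"
theorem nsCh_run (t : Nat) (pre done : List Char) (c c' : Char) (k : Nat)
    (hk : PySem.List.index? pvAlpha c = some k) (hlt : k + 1 < 36)
    (hc' : pvAlpha[k+1]? = some c') :
    nsCh pvAlpha (pre ++ c :: (List.replicate t 'Z' ++ done)) ((pre.length + t : Nat) : Int)
      = some (if t = 0 then c' else '0') := by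
  unfold nsCh
  rw [PySem.List.pyGet?_natCast]
  cases t with
  | zero =>
    rw [show pre.length + 0 = pre.length by omega, List.getElem?_append_right (by omega)]
    simp only [Nat.sub_self, List.getElem?_cons_zero]
    have hmod : PySem.Int.mod ((k : Int) + 1) 36 = ((k + 1 : Nat) : Int) := by
      rw [PySem.Int.mod_eq_emod_of_pos (by omega)]
      rw [Int.emod_eq_of_lt (by omega) (by omega)]
      push_cast; ring
    rw [hk]
    show PySem.List.pyGet? pvAlpha (PySem.Int.mod ((k : Int) + 1) 36)
      = some (if 0 = 0 then c' else '0')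
    rw [hmod, PySem.List.pyGet?_natCast, hc']
    simp
  | succ s =>
    rw [List.getElem?_append_right (by omega)]
    have h1 : pre.length + (s+1) - pre.length = s + 1 := by omega
    rw [h1, List.getElem?_cons_succ]
    rw [List.getElem?_append_left (by simp), List.getElem?_replicate_of_lt (by omega),
        if_neg (by omega)]
    decide

-- carry phase over an all-'Z' list: every position is set to '0'
theorem nsLoop_allZ (t : Nat) (done : List Char) (fuel : Nat) (hf : t + 1 ≤ fuel) :
    nsLoop pvAlpha (List.replicate t 'Z' ++ done) ((t : Int) - 1) '0' fuel
      = List.replicate t '0' ++ done := by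
  induction t generalizing done fuel with
  | zero => simpa using nsLoop_neg_one pvAlpha done '0' fuel
  | succ t ih =>
    obtain ⟨f, rfl⟩ : ∃ f, fuel = f + 1 := ⟨fuel - 1, by omega⟩
    have hi : ((t + 1 : Nat) : Int) - 1 = ((t : Nat) : Int) := by push_cast; ring
    rw [nsLoop, hi]
    have hne : ((t : Nat) : Int) ≠ -1 := by omega
    simp only [hne, if_false, PySem.List.pySetD_natCast]
    have hset : (List.replicate (t+1) 'Z' ++ done).set t '0'
        = List.replicate t 'Z' ++ ('0' :: done) := by
      rw [List.replicate_succ']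
      simp
    rw [if_neg (by simp), hset]
    cases t with
    | zero =>
      simp only [Nat.cast_zero, zero_sub]
      rcases h : nsCh pvAlpha ('0' :: done) (-1 : Int) with _ | c <;> simp [h, nsLoop_neg_one]
    | succ k =>
      have hi2 : ((k + 1 : Nat) : Int) - 1 = ((k : Nat) : Int) := by push_cast; ring
      have hch : nsCh pvAlpha (List.replicate (k+1) 'Z' ++ '0' :: done) (((k+1 : Nat) : Int) - 1)
          = some '0' := by
        rw [hi2]
        unfold nsCh
        rw [PySem.List.pyGet?_natCast]
        rw [List.getElem?_append_left (by simp), List.getElem?_replicate_of_lt (by omega)]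
        decide
      rw [hch]
      show nsLoop pvAlpha (List.replicate (k+1) 'Z' ++ '0' :: done) ((k+1 : Nat) - 1) '0' f = _
      rw [ih ('0' :: done) f (by omega)]
      rw [List.replicate_succ' (n := k+1) (a := '0')]
      simp

-- the generic run: prefix, a bumpable digit c (index k, k+1 < 36), then t 'Z's
theorem nsLoop_run (t : Nat) (pre done : List Char) (c c' : Char) (k : Nat) (fuel : Nat)
    (hk : PySem.List.index? pvAlpha c = some k) (hlt : k + 1 < 36)
    (hc' : pvAlpha[k+1]? = some c') (hne : c' ≠ '0') (hf : t + 1 ≤ fuel) :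
    nsLoop pvAlpha (pre ++ c :: (List.replicate t 'Z' ++ done)) ((pre.length + t : Nat) : Int)
      (if t = 0 then c' else '0') fuel
      = pre ++ c' :: (List.replicate t '0' ++ done) := by
  induction t generalizing done fuel with
  | zero =>
    obtain ⟨f, rfl⟩ : ∃ f, fuel = f + 1 := ⟨fuel - 1, by omega⟩
    rw [if_pos rfl, nsLoop]
    have hne' : ((pre.length + 0 : Nat) : Int) ≠ -1 := by omega
    rw [if_neg hne']
    simp only [PySem.List.pySetD_natCast]
    rw [if_pos hne]
    simp
  | succ t ih =>
    obtain ⟨f, rfl⟩ : ∃ f, fuel = f + 1 := ⟨fuel - 1, by omega⟩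
    rw [if_neg (by omega), nsLoop]
    rw [if_neg (show ((pre.length + (t+1) : Nat) : Int) ≠ -1 by omega)]
    simp only [PySem.List.pySetD_natCast]
    rw [if_neg (by simp)]
    have hsplit : pre ++ c :: (List.replicate (t+1) 'Z' ++ done)
        = (pre ++ c :: List.replicate t 'Z') ++ 'Z' :: done := by
      simp [List.replicate_succ' (n := t) (a := 'Z')]
    have hlen : pre.length + (t+1) = (pre ++ c :: List.replicate t 'Z').length := by
      (simp; try omega)
    have hset : (pre ++ c :: (List.replicate (t+1) 'Z' ++ done)).set (pre.length + (t+1)) '0'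
        = pre ++ c :: (List.replicate t 'Z' ++ '0' :: done) := by
      rw [hsplit, hlen]
      simp
    rw [hset]
    have hi : ((pre.length + (t+1) : Nat) : Int) - 1 = ((pre.length + t : Nat) : Int) := by
      push_cast; ring
    rw [hi, nsCh_run t pre ('0' :: done) c c' k hk hlt hc']
    show nsLoop pvAlpha (pre ++ c :: (List.replicate t 'Z' ++ '0' :: done))
      ((pre.length + t : Nat) : Int) (if t = 0 then c' else '0') f = _
    rw [ih ('0' :: done) f (by omega)]
    rw [List.replicate_succ' (n := t) (a := '0')]
    simp

theorem mem_pvAlpha_of (c : Char) (h : ('0' ≤ c ∧ c ≤ '9') ∨ ('A' ≤ c ∧ c ≤ 'Z')) :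
    c ∈ pvAlpha := by
  have hc : Char.ofNat c.toNat = c := Char.ofNat_toNat c
  have h' : (48 ≤ c.toNat ∧ c.toNat ≤ 57) ∨ (65 ≤ c.toNat ∧ c.toNat ≤ 90) := by
    rcases h with ⟨h1,h2⟩|⟨h1,h2⟩ <;> [left; right] <;>
      (constructor <;> simp [Char.le_def, UInt32.le_iff_toNat_le] at h1 h2 <;> omega)
  rw [← hc]
  generalize c.toNat = n at h'
  rcases h' with ⟨h1,h2⟩|⟨h1,h2⟩ <;> interval_cases n <;> decide

-- ===== VERDICT (by name: the statement is the Claim_ definition above) =====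
theorem next_string_spec : Claim_equal_next_string := by
  intro current _ hpre
  unfold Spec_next_string
  unfold Pre_next_string at hpre
  obtain ⟨hnil, hhead⟩ := hpre
  simp only [next_string, next_string_alt]
  generalize current.toList = cs at hnil hhead ⊢
  have hsplitrev := List.takeWhile_append_dropWhile
    (p := fun c => c == 'Z') (l := cs.reverse)
  have hT : cs.reverse.takeWhile (fun c => c == 'Z')
      = List.replicate (cs.reverse.takeWhile (fun c => c == 'Z')).length 'Z' :=
    List.eq_replicate_iff.mpr ⟨rfl, fun b hb => by simpa using List.mem_takeWhile_imp hb⟩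
  have hpos : 0 < cs.length := List.length_pos_of_ne_nil hnil
  rcases hD : cs.reverse.dropWhile (fun c => c == 'Z') with _ | ⟨c, rest⟩
  · -- all characters are 'Z'
    have hrep : cs = List.replicate cs.length 'Z' := by
      have h1 : cs.reverse = cs.reverse.takeWhile (fun c => c == 'Z') := by
        conv_lhs => rw [← hsplitrev]
        rw [hD, List.append_nil]
      have h2 := congrArg List.reverse h1
      rw [List.reverse_reverse] at h2
      rw [h2]
      conv_lhs => rw [hT]
      simp [List.reverse_replicate]
    obtain ⟨m, hm⟩ : ∃ m, cs.length = m + 1 := ⟨cs.length - 1, by omega⟩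
    have hch : nsCh pvAlpha cs ((cs.length : Int) - 1) = some '0' := by
      unfold nsCh
      rw [hm, show ((m + 1 : Nat) : Int) - 1 = ((m : Nat) : Int) by push_cast; ring]
      rw [PySem.List.pyGet?_natCast]
      conv_lhs => rw [hrep, hm]
      rw [List.getElem?_replicate_of_lt (by omega)]
      decide
    rw [hch]
    show String.ofList (nsLoop pvAlpha cs ((cs.length : Int) - 1) '0' (cs.length + 1))
      = if cs.length - (List.reverse [] : List Char).length = cs.length
        then String.ofList (List.replicate (cs.length - (List.reverse [] : List Char).length) '0')
        else _
    conv_lhs => rw [hrep]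
    simp only [List.length_replicate]
    rw [← List.append_nil (List.replicate cs.length 'Z')]
    rw [nsLoop_allZ cs.length [] _ (by omega)]
    simp
  · -- a bumpable character c, then a trailing run of t 'Z's
    have hcZ : c ≠ 'Z' := by
      have hh := List.head_dropWhile_not (fun c => c == 'Z') (l := cs.reverse)
        (show cs.reverse.dropWhile (fun c => c == 'Z') ≠ [] by simp [hD])
      simp only [hD, List.head_cons] at hh
      simpa using hh
    have hmem : c ∈ pvAlpha := by
      apply mem_pvAlpha_of
      simpa [hD] using hhead
    obtain ⟨k, hk⟩ : ∃ k, PySem.List.index? pvAlpha c = some k :=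
      Option.isSome_iff_exists.mp ((PySem.List.index?_isSome_iff _ _).mpr hmem)
    obtain ⟨hklt, hgetk, -⟩ := PySem.List.getElem_of_index?_eq_some hk
    have hk36 : k < 36 := by simpa [pvAlpha] using hklt
    have hgetk? : pvAlpha[k]? = some c := by
      rw [List.getElem?_eq_getElem hklt, hgetk]
    have hk35 : k ≠ 35 := by
      intro h
      rw [h] at hgetk?
      have h35 : pvAlpha[(35:Nat)]? = some 'Z' := by decide
      rw [h35] at hgetk?
      exact hcZ (by injection hgetk? with h'; exact h'.symm)
    have hlt : k + 1 < 36 := by omega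
    have hc' : pvAlpha[k+1]? = some (pvAlpha[k+1]'(by simpa [pvAlpha] using hlt)) :=
      List.getElem?_eq_getElem _
    set c' := pvAlpha[k+1]'(by simpa [pvAlpha] using hlt) with hc'def
    have hcne0 : c' ≠ '0' := by
      intro h
      have h0 : pvAlpha[0]'(by decide) = '0' := by decide
      have := (List.Nodup.getElem_inj_iff (by decide : pvAlpha.Nodup)).mp
        (h0 ▸ h : pvAlpha[k+1]'(by simpa [pvAlpha] using hlt) = pvAlpha[0]'(by decide))
      omega
    -- decompose cs
    set pre := rest.reverse with hpredef
    set t := (cs.reverse.takeWhile (fun c => c == 'Z')).length with htdef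
    have hcs2 : cs = pre ++ c :: (List.replicate t 'Z' ++ []) := by
      have h1 := congrArg List.reverse hsplitrev
      rw [List.reverse_reverse, hD] at h1
      conv_lhs => rw [← h1]
      conv_lhs => rw [hT]
      simp [List.reverse_replicate]
      rw [hpredef]
    have hlen : cs.length = pre.length + t + 1 := by
      rw [hcs2]; simp; omega
    have hchA : nsCh pvAlpha cs ((cs.length : Int) - 1) = some (if t = 0 then c' else '0') := by
      rw [show ((cs.length : Int)) - 1 = ((pre.length + t : Nat) : Int) by rw [hlen]; push_cast; ring]
      conv_lhs => rw [hcs2]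
      exact nsCh_run t pre [] c c' k hk hlt hc'
    rw [hchA]
    show String.ofList (nsLoop pvAlpha cs ((cs.length : Int) - 1) (if t = 0 then c' else '0')
      (cs.length + 1)) = _
    conv_lhs => rw [show ((cs.length : Int)) - 1 = ((pre.length + t : Nat) : Int) by
      rw [hlen]; push_cast; ring]
    conv_lhs => rw [hcs2]
    rw [nsLoop_run t pre [] c c' k _ hk hlt hc' hcne0 (by simp; omega)]
    -- B side
    have hrev : (c :: rest).reverse = pre ++ [c] := by simp [hpredef]
    rw [hrev]
    have hkB : PySem.List.index? pvAlpha c = some k := hk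
    have hc'B : PySem.List.pyGet? pvAlpha ((k : Int) + 1) = some c' := by
      rw [show ((k : Int) + 1) = ((k + 1 : Nat) : Int) by push_cast; ring,
        PySem.List.pyGet?_natCast]
      exact hc'
    have hlen2 : cs.length - (pre ++ [c]).length = t := by simp [hlen]
    rw [hlen2, if_neg (by omega : ¬ (t = cs.length))]
    simp only [PySem.List.pyGet?_neg_one_append_singleton, hkB, hc'B,
      PySem.List.slice_to_neg_one, List.dropLast_concat]
    simp
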